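-- pv_equiv track=rewrite | github.com/rrwick/Polypolish-paper | scripts/confusion_matrix.py | count_positions
-- ===== SOURCE A (Python) =====
-- def count_positions(reference_seq, unpolished_seq, polished_seq):
--     tp, tn, fp, fn = 0, 0, 0, 0
--     for start, end in iterate_seq(reference_seq):
--         reference_slice = reference_seq[start:end]
--         unpolished_slice = unpolished_seq[start:end]
--         polished_slice = polished_seq[start:end]
--
--         unpolished_correct = (reference_slice == unpolished_slice)
--         polished_correct = (reference_slice == polished_slice)
--
--         if unpolished_correct:
--             if polished_correct:
--                 tn += 1
--             else:
--                 fp += 1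
--         else:
--             if polished_correct:
--                 tp += 1
--             else:
--                 fn += 1
--
--     return tp, tn, fp, fn
--
-- def iterate_seq(seq):
--     """
--     This generator iterates through a sequence one base at a time, returning start/end slice
--     positions. Gaps are included after a base, so each returned slice positions will include
--     exactly one base followed by zero or more gaps.
--     """
--     if not seq:
--         return
--     start = 0
--     while True:
--         end = start + 1
--         while True:
--             if end < len(seq) and seq[end] == '-':
--                 end += 1
--             else:
--                 break
--         yield start, end
--         start = end
--         if start >= len(seq):
--             return
-- ===== SOURCE B (Python) =====
-- def count_positions(reference_seq, unpolished_seq, polished_seq):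
--     # Single index loop over the reference; a slice = one base plus trailing '-'s.
--     # Flags stay True iff every position of the current slice matches (length-aware,
--     # like Python string-slice equality when the other sequence is shorter).
--     tp = tn = fp = fn = 0
--     n = len(reference_seq)
--     lu = len(unpolished_seq)
--     lp = len(polished_seq)
--     u_ok = True
--     p_ok = True
--     for i in range(n):
--         c = reference_seq[i]
--         u_ok = u_ok and i < lu and unpolished_seq[i] == c
--         p_ok = p_ok and i < lp and polished_seq[i] == c
--         if i + 1 == n or reference_seq[i + 1] != '-':
--             if u_ok:
--                 if p_ok:
--                     tn += 1
--                 else: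
--                     fp += 1
--             else:
--                 if p_ok:
--                     tp += 1
--                 else:
--                     fn += 1
--             u_ok = True
--             p_ok = True
--     return tp, tn, fp, fn
-- ===== Notes on version B (the rewrite author's own statement) =====
-- stated objective: simpler
-- what changed: Replaces the generator of (start,end) slice positions and the three per-slice string slicings/comparisons by one index loop over the reference that maintains per-slice match flags (length-aware character comparison) and closes a slice when the next character is not '-'.
import Mathlib
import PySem

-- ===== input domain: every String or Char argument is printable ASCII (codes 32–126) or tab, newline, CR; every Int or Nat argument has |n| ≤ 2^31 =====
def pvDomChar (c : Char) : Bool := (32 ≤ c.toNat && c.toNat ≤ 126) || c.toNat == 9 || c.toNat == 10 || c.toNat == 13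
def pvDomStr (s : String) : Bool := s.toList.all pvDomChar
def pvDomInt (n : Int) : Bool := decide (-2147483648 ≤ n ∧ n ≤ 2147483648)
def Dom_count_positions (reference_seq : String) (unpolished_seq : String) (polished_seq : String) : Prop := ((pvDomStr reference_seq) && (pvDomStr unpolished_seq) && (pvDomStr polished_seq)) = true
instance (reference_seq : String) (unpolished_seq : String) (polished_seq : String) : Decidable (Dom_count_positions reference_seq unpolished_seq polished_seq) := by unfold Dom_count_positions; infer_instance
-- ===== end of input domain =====

-- B replaces A's generator + string slicing by one index loop with per-slice match flags; objective: simpler.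

-- ===== PORT A =====
-- inner 'while' of iterate_seq: extend end over the run of '-' characters
def cpExtend (seq : List Char) (e : Nat) : Nat :=
  if _h : e < seq.length ∧ seq[e]? = some '-' then cpExtend seq (e + 1) else e
termination_by seq.length - e
decreasing_by omega

-- needed by cpLoop's termination (cited below)
theorem cpExtend_ge (seq : List Char) (e : Nat) : e ≤ cpExtend seq e := by
  fun_induction cpExtend seq e with
  | case1 e h ih => omega
  | case2 e h => omega

-- outer loop of iterate_seq fused with A's for-loop body
def cpLoop (ref u p : List Char) (start : Nat) (tp tn fp fn : Int) : Int × Int × Int × Int :=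
  if h : start < ref.length then
    let e := cpExtend ref (start + 1)
    let reference_slice := PySem.List.slice ref (some (start : Int)) (some (e : Int))
    let unpolished_slice := PySem.List.slice u (some (start : Int)) (some (e : Int))
    let polished_slice := PySem.List.slice p (some (start : Int)) (some (e : Int))
    let unpolished_correct := reference_slice == unpolished_slice
    let polished_correct := reference_slice == polished_slice
    let acc :=
      if unpolished_correct then
        (if polished_correct then (tp, tn + 1, fp, fn) else (tp, tn, fp + 1, fn))
      else
        (if polished_correct then (tp + 1, tn, fp, fn) else (tp, tn, fp, fn + 1))
    cpLoop ref u p e acc.1 acc.2.1 acc.2.2.1 acc.2.2.2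
  else (tp, tn, fp, fn)
termination_by ref.length - start
decreasing_by have := cpExtend_ge ref (start + 1); omega

def count_positions (reference_seq : String) (unpolished_seq : String) (polished_seq : String) : Int × Int × Int × Int :=
  cpLoop reference_seq.toList unpolished_seq.toList polished_seq.toList 0 0 0 0 0

-- ===== PORT B =====
-- single index loop; uok/pok are the per-slice match flags ('x[i]? == some c' = Python's 'i < len(x) and x[i] == c')
def cpAltLoop (ref u p : List Char) (i : Nat) (uok pok : Bool) (tp tn fp fn : Int) : Int × Int × Int × Int :=
  if h : i < ref.length then
    let c := ref[i]
    let uok' := uok && (u[i]? == some c)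
    let pok' := pok && (p[i]? == some c)
    if i + 1 = ref.length ∨ ¬ (ref[i + 1]? = some '-') then
      if uok' then
        (if pok' then cpAltLoop ref u p (i + 1) true true tp (tn + 1) fp fn
         else cpAltLoop ref u p (i + 1) true true tp tn (fp + 1) fn)
      else
        (if pok' then cpAltLoop ref u p (i + 1) true true (tp + 1) tn fp fn
         else cpAltLoop ref u p (i + 1) true true tp tn fp (fn + 1))
    else
      cpAltLoop ref u p (i + 1) uok' pok' tp tn fp fn
  else (tp, tn, fp, fn)
termination_by ref.length - i

def count_positions_alt (reference_seq : String) (unpolished_seq : String) (polished_seq : String) : Int × Int × Int × Int :=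
  cpAltLoop reference_seq.toList unpolished_seq.toList polished_seq.toList 0 true true 0 0 0 0

-- ===== PRECONDITION & SPEC =====
def Spec_count_positions (reference_seq : String) (unpolished_seq : String) (polished_seq : String) (out : Int × Int × Int × Int) : Prop := out = count_positions_alt reference_seq unpolished_seq polished_seq
instance (reference_seq : String) (unpolished_seq : String) (polished_seq : String) (out : Int × Int × Int × Int) : Decidable (Spec_count_positions reference_seq unpolished_seq polished_seq out) := by unfold Spec_count_positions; infer_instance

-- ===== CLAIM (what is proved, stated in full; the proofs are below) =====
def Claim_equal_count_positions : Prop := ∀ (reference_seq : String) (unpolished_seq : String) (polished_seq : String), Dom_count_positions reference_seq unpolished_seq polished_seq → Spec_count_positions reference_seq unpolished_seq polished_seq (count_positions reference_seq unpolished_seq polished_seq)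

-- ===== LEMMAS AND PROOFS =====

-- "the other sequence matches the reference on positions [i, e)"
def eqR (ref other : List Char) (i e : Nat) : Bool :=
  decide (∀ k, k < e - i → other[i + k]? = ref[i + k]?)

theorem eqR_one (ref other : List Char) (i : Nat) :
    eqR ref other i (i + 1) = (other[i]? == ref[i]?) := by
  have h1 : i + 1 - i = 1 := by omega
  simp only [eqR, h1, Nat.lt_one_iff, forall_eq, Nat.add_zero]
  rw [Bool.eq_iff_iff]
  simp

theorem eqR_split (ref other : List Char) (i e : Nat) (h : i < e) :
    eqR ref other i e = ((other[i]? == ref[i]?) && eqR ref other (i + 1) e) := by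
  simp only [eqR]
  rw [Bool.eq_iff_iff]
  simp only [Bool.and_eq_true, decide_eq_true_iff, beq_iff_eq]
  constructor
  · intro hp
    refine ⟨by have := hp 0 (by omega); simpa using this, fun k hk => ?_⟩
    have := hp (k + 1) (by omega)
    simpa [Nat.add_assoc, Nat.add_comm 1 k] using this
  · rintro ⟨h0, hrest⟩ k hk
    cases k with
    | zero => simpa using h0
    | succ m =>
      have := hrest m (by omega)
      simpa [Nat.add_assoc, Nat.add_comm 1 m] using this

-- A's slice comparison equals the positionwise match test
theorem slice_beq_eqR (ref other : List Char) (i e : Nat) :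
    (PySem.List.slice ref (some (i : Int)) (some (e : Int)) ==
       PySem.List.slice other (some (i : Int)) (some (e : Int))) = eqR ref other i e := by
  rw [PySem.List.slice_natCast, PySem.List.slice_natCast, Bool.eq_iff_iff]
  simp only [beq_iff_eq, eqR, decide_eq_true_iff]
  constructor
  · intro heq k hk
    have h1 := congrArg (fun l => l[k]?) heq
    simp only [List.getElem?_take, List.getElem?_drop, if_pos hk] at h1
    exact h1.symm
  · intro hall
    apply List.ext_getElem?
    intro k
    by_cases hk : k < e - i
    · simp only [List.getElem?_take, List.getElem?_drop, if_pos hk]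
      exact (hall k hk).symm
    · simp [hk]

theorem cpExtend_spec (seq : List Char) (e : Nat) (he : e ≤ seq.length) :
    e ≤ cpExtend seq e ∧ cpExtend seq e ≤ seq.length ∧
      (∀ j, e ≤ j → j < cpExtend seq e → seq[j]? = some '-') ∧
      (cpExtend seq e = seq.length ∨ ¬ (seq[cpExtend seq e]? = some '-')) := by
  fun_induction cpExtend seq e with
  | case1 e h ih =>
    obtain ⟨h1, h2, h3, h4⟩ := ih (by omega)
    refine ⟨by omega, h2, ?_, h4⟩
    intro j hj1 hj2
    rcases Nat.eq_or_lt_of_le hj1 with heq | hlt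
    · exact heq ▸ h.2
    · exact h3 j hlt hj2
  | case2 e h =>
    refine ⟨le_refl _, he, fun j hj1 hj2 => by omega, ?_⟩
    by_cases hlen : e = seq.length
    · exact Or.inl hlen
    · exact Or.inr (fun hc => h ⟨by omega, hc⟩)

-- the count update both programs perform when a slice closes (proof-side helper)
def cpBump (uc pc : Bool) (tp tn fp fn : Int) : Int × Int × Int × Int :=
  if uc then (if pc then (tp, tn + 1, fp, fn) else (tp, tn, fp + 1, fn))
  else (if pc then (tp + 1, tn, fp, fn) else (tp, tn, fp, fn + 1))

-- scanning one slice [i, e) with B's flag loop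
theorem altLoop_run (ref u p : List Char) (e : Nat)
    (he : e ≤ ref.length) (hstop : e = ref.length ∨ ¬ (ref[e]? = some '-')) :
    ∀ n i, e - i ≤ n → i < e → (∀ j, i < j → j < e → ref[j]? = some '-') →
    ∀ uok pok tp tn fp fn,
      cpAltLoop ref u p i uok pok tp tn fp fn =
        (let acc := cpBump (uok && eqR ref u i e) (pok && eqR ref p i e) tp tn fp fn
         cpAltLoop ref u p e true true acc.1 acc.2.1 acc.2.2.1 acc.2.2.2) := by
  intro n
  induction n with
  | zero => intro i h1 h2; omega
  | succ n ih =>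
    intro i hle hi hg uok pok tp tn fp fn
    have hilen : i < ref.length := lt_of_lt_of_le hi he
    have hrefi : ref[i]? = some ref[i] := List.getElem?_eq_getElem hilen
    rw [cpAltLoop]
    simp only [dif_pos hilen]
    by_cases hcase : i + 1 = e
    · -- last position of the slice: the close condition holds
      have hcond : i + 1 = ref.length ∨ ¬ (ref[i + 1]? = some '-') := hcase ▸ hstop
      rw [if_pos hcond]
      simp only [cpBump, ← hcase, eqR_one, hrefi]
      split_ifs <;> rfl
    · -- interior gap position: the loop continues
      have hgap : ref[i + 1]? = some '-' := hg (i + 1) (by omega) (by omega)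
      have hcond : ¬ (i + 1 = ref.length ∨ ¬ (ref[i + 1]? = some '-')) := by
        push Not
        constructor
        · intro hlen
          rw [hlen, List.getElem?_eq_none (le_refl _)] at hgap
          simp at hgap
        · exact hgap
      rw [if_neg hcond]
      rw [ih (i + 1) (by omega) (by omega) (fun j hj1 hj2 => hg j (by omega) hj2)]
      have hsplit : ∀ (b : Bool) (other : List Char),
          ((b && (other[i]? == some ref[i])) && eqR ref other (i + 1) e) = (b && eqR ref other i e) := by
        intro b other
        rw [eqR_split ref other i e hi, hrefi, Bool.and_assoc]
      rw [hsplit uok u, hsplit pok p]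

theorem loop_eq (ref u p : List Char) : ∀ n start tp tn fp fn, ref.length - start ≤ n →
    cpLoop ref u p start tp tn fp fn = cpAltLoop ref u p start true true tp tn fp fn := by
  intro n
  induction n with
  | zero =>
    intro start tp tn fp fn h
    have hge : ¬ start < ref.length := by omega
    rw [cpLoop, cpAltLoop, dif_neg hge, dif_neg hge]
  | succ n ih =>
    intro start tp tn fp fn hle
    by_cases hlt : start < ref.length
    · obtain ⟨h1, h2, h3, h4⟩ := cpExtend_spec ref (start + 1) (by omega)
      rw [cpLoop]
      simp only [dif_pos hlt, slice_beq_eqR]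
      rw [altLoop_run ref u p (cpExtend ref (start + 1)) h2 h4 (ref.length - start) start
            (by omega) (by omega) (fun j hj1 hj2 => h3 j (by omega) hj2)]
      simp only [Bool.true_and]
      rw [← ih (cpExtend ref (start + 1)) _ _ _ _ (by omega)]
      rfl
    · rw [cpLoop, cpAltLoop, dif_neg hlt, dif_neg hlt]

-- ===== VERDICT (by name: the statement is the Claim_ definition above) =====
theorem count_positions_spec : Claim_equal_count_positions := by
  intro r u p _
  unfold Spec_count_positions count_positions count_positions_alt
  exact loop_eq _ _ _ _ 0 0 0 0 0 (le_refl _)
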